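-- pv_equiv track=rewrite | github.com/RiswanthRagav/Trustscope | Objects/Code/cat_4.py | has_admin_principal
-- ===== SOURCE A (Python) =====
-- from typing import Dict, List, Any, Tuple
--
-- def has_admin_principal(members: List[str], admin_principals_lower: List[str]) -> Tuple[bool, List[str]]:
--     matched = []
--     for m in members:
--         lm = m.lower()
--         for token in admin_principals_lower:
--             if token in lm:
--                 matched.append(m)
--                 break
--     return (len(matched) > 0, matched)
-- ===== SOURCE B (Python) =====
-- def has_admin_principal(members, admin_principals_lower):
--     # index the tokens by their first character, then scan each lowercased member once
--     has_empty = False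
--     by_first = {}
--     for t in admin_principals_lower:
--         if t == "":
--             has_empty = True
--         else:
--             by_first.setdefault(t[0], []).append(t)
--     matched = [m for m in members if _scan(m.lower(), has_empty, by_first)]
--     return (matched != [], matched)
--
-- def _scan(lm, has_empty, by_first):
--     if has_empty:
--         return True
--     for j, c in enumerate(lm):
--         for t in by_first.get(c, []):
--             if lm.startswith(t, j):
--                 return True
--     return False
-- ===== Notes on version B (the rewrite author's own statement) =====
-- stated objective: alternative
-- what changed: B builds a first-character index of the admin tokens once and then makes a single position scan over each lowercased member testing only the tokens bucketed under that character as prefixes, instead of A's per-member loop calling the substring operator for every token; the match list is a filter comprehension instead of an accumulator loop with break.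
import Mathlib
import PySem

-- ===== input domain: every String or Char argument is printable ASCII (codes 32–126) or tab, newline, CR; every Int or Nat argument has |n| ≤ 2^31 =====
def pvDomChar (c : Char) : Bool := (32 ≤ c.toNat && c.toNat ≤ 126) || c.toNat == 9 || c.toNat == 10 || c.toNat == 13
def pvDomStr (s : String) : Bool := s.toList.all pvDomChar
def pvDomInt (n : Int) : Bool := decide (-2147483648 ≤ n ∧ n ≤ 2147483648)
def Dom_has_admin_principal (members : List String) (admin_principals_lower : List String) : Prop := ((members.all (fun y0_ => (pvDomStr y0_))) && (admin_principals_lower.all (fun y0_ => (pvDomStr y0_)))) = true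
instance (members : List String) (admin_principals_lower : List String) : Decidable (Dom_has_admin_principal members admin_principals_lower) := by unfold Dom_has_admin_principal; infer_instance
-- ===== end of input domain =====

-- B replaces A's per-member-per-token substring searches with a first-character index over the
-- tokens and a single position scan per member; alternative structure (not claimed faster).

-- ===== PORT A =====
-- inner 'for token in admin_principals_lower: if token in lm: … break' — returns whether the break fired
def pvAInner (lm : String) : List String → Bool
  | [] => false
  | t :: rest => if PySem.Str.isIn t lm then true else pvAInner lm rest

def has_admin_principal (members : List String) (admin_principals_lower : List String) : Bool × List String :=
  let matched := members.foldl (fun acc m =>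
    if pvAInner (PySem.Str.lower m) admin_principals_lower then acc ++ [m] else acc) []
  (decide (0 < PySem.List.len matched), matched)

-- ===== PORT B =====
-- the build loop: state (has_empty, by_first); 't == ""' / 't[0]' ported as the match on t.toList
-- ('t[0]' is exact here because the branch has t ≠ "")
def pvBuild (st : Bool × PySem.Dict Char (List String)) : List String → Bool × PySem.Dict Char (List String)
  | [] => st
  | t :: rest =>
    pvBuild (match t.toList with
             | [] => (true, st.2)
             | c :: _ => (st.1, st.2.insert c (st.2.getD c [] ++ [t]))) rest

-- 'lm.startswith(t, j)' for 0 ≤ j < len(lm) is exactly: t is a prefix of lm[j:] — ported as startswith on drop j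
def pvScan (lm : String) (hasEmpty : Bool) (byFirst : PySem.Dict Char (List String)) : Bool :=
  if hasEmpty then true
  else (PySem.List.enumerate lm.toList 0).any (fun jc =>
    (byFirst.getD jc.2 []).any (fun t => PySem.Chars.startswith (lm.toList.drop jc.1.toNat) t.toList))

def has_admin_principal_alt (members : List String) (admin_principals_lower : List String) : Bool × List String :=
  let be := pvBuild (false, PySem.Dict.empty) admin_principals_lower
  let matched := members.filter (fun m => pvScan (PySem.Str.lower m) be.1 be.2)
  (decide (matched ≠ []), matched)

-- ===== PRECONDITION & SPEC =====
def Spec_has_admin_principal (members : List String) (admin_principals_lower : List String) (out : Bool × List String) : Prop := out = has_admin_principal_alt members admin_principals_lower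
instance (members : List String) (admin_principals_lower : List String) (out : Bool × List String) : Decidable (Spec_has_admin_principal members admin_principals_lower out) := by unfold Spec_has_admin_principal; infer_instance

-- ===== CLAIM (what is proved, stated in full; the proofs are below) =====
def Claim_equal_has_admin_principal : Prop := ∀ (members : List String) (admin_principals_lower : List String), Dom_has_admin_principal members admin_principals_lower → Spec_has_admin_principal members admin_principals_lower (has_admin_principal members admin_principals_lower)

-- ===== LEMMAS AND PROOFS =====

-- A's inner loop is an 'any' over the tokens
theorem pvAInner_eq_any (lm : String) (ts : List String) :
    pvAInner lm ts = ts.any (fun t => PySem.Str.isIn t lm) := by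
  induction ts with
  | nil => rfl
  | cons t rest ih =>
    rw [pvAInner, ih]; cases h : PySem.Str.isIn t lm <;>
      simp only [PySem.Str.isIn_eq] at h <;> simp [h]

-- the build loop's flag: whether some token is empty
theorem pvBuild_fst (ts : List String) (st : Bool × PySem.Dict Char (List String)) :
    (pvBuild st ts).1 = (st.1 || ts.any (fun t => t.toList.isEmpty)) := by
  induction ts generalizing st with
  | nil => simp [pvBuild]
  | cons t rest ih =>
    rw [pvBuild]
    cases htl : t.toList with
    | nil => simp [ih, htl]
    | cons c cs => simp [ih, htl]

-- the build loop's buckets: the tokens whose first character is c, in order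
theorem pvBuild_getD (ts : List String) (st : Bool × PySem.Dict Char (List String)) (c : Char) :
    (pvBuild st ts).2.getD c [] =
      st.2.getD c [] ++ ts.filter (fun t => t.toList.head? = some c) := by
  induction ts generalizing st with
  | nil => simp [pvBuild]
  | cons t rest ih =>
    rw [pvBuild]
    cases htl : t.toList with
    | nil => simp [ih, htl]
    | cons c0 cs =>
      rw [ih]
      simp only [PySem.Dict.getD_insert, htl, List.filter_cons, List.head?_cons]
      by_cases hc : c = c0
      · subst hc; simp
      · simp [hc, Ne.symm hc]

-- bucket membership in the finished index
theorem pvBuild_mem (ts : List String) (c : Char) (t : String) :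
    t ∈ (pvBuild (false, PySem.Dict.empty) ts).2.getD c [] ↔
      t ∈ ts ∧ t.toList.head? = some c := by
  rw [pvBuild_getD]
  simp [PySem.Dict.getD_empty, List.mem_filter]

-- B's indexed scan decides the same predicate as A's token-major substring tests
theorem pvScan_eq (lm : String) (ts : List String) :
    pvScan lm (pvBuild (false, PySem.Dict.empty) ts).1 (pvBuild (false, PySem.Dict.empty) ts).2
      = ts.any (fun t => PySem.Str.isIn t lm) := by
  rw [pvScan]
  by_cases hE : (pvBuild (false, PySem.Dict.empty) ts).1 = true
  · -- some token is empty: both sides are true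
    rw [if_pos hE]
    rw [pvBuild_fst] at hE
    simp only [Bool.false_or] at hE
    obtain ⟨t, htm, hte⟩ := List.any_eq_true.mp hE
    symm
    refine List.any_eq_true.mpr ⟨t, htm, ?_⟩
    simp only [PySem.Str.isIn_eq]
    have ht : t.toList = [] := by simpa [List.isEmpty_iff] using hte
    rw [ht]; exact PySem.Chars.isIn_nil lm.toList
  · rw [if_neg hE]
    have hnoE : ∀ t ∈ ts, t.toList ≠ [] := by
      intro t htm htl
      apply hE
      rw [pvBuild_fst, Bool.false_or]
      exact List.any_eq_true.mpr ⟨t, htm, by simp [htl]⟩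
    apply Bool.eq_iff_iff.mpr
    simp only [List.any_eq_true, PySem.List.mem_enumerate_iff, PySem.Str.isIn_eq]
    constructor
    · rintro ⟨p, ⟨k, hk, hp⟩, t, htb, hsw⟩
      subst hp
      obtain ⟨htm, -⟩ := (pvBuild_mem ts _ t).mp htb
      refine ⟨t, htm, (PySem.Chars.exists_prefix_drop_iff_isIn _ _).mp ⟨k, ?_⟩⟩
      have := (PySem.Chars.startswith_iff _ _).mp hsw
      simpa using this
    · rintro ⟨t, htm, hin⟩
      obtain ⟨j, hj⟩ := (PySem.Chars.exists_prefix_drop_iff_isIn _ _).mpr hin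
      cases htl : t.toList with
      | nil => exact absurd htl (hnoE t htm)
      | cons c0 cs =>
        rw [htl] at hj
        -- a nonempty prefix of drop j forces j < length and pins lm.toList[j] = c0
        have hjlt : j < lm.toList.length := by
          by_contra hge
          have : lm.toList.drop j = [] := List.drop_eq_nil_of_le (by omega)
          rw [this] at hj
          exact absurd (List.prefix_nil.mp hj) (by simp)
        obtain ⟨r, hr⟩ := hj
        have hc0 : lm.toList[j] = c0 := by
          have h0 : (lm.toList.drop j)[0]'(by rw [← hr]; simp) = c0 := by
            simp [← hr]
          rw [List.getElem_drop] at h0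
          simpa using h0
        refine ⟨((j : Int), lm.toList[j]), ⟨j, hjlt, by simp⟩, t,
          (pvBuild_mem ts _ t).mpr ⟨htm, by rw [htl, hc0]; rfl⟩, ?_⟩
        refine (PySem.Chars.startswith_iff _ _).mpr ?_
        simp only [Int.toNat_natCast]
        exact ⟨r, by rw [htl]; simpa using hr⟩

-- ===== VERDICT (by name: the statement is the Claim_ definition above) =====
theorem has_admin_principal_spec : Claim_equal_has_admin_principal := by
  intro members admin _
  show _ = has_admin_principal_alt members admin
  unfold has_admin_principal has_admin_principal_alt
  rw [PySem.List.foldl_append_if_eq_filter]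
  have hpred : ∀ m : String,
      pvAInner (PySem.Str.lower m) admin =
        pvScan (PySem.Str.lower m) (pvBuild (false, PySem.Dict.empty) admin).1
          (pvBuild (false, PySem.Dict.empty) admin).2 := by
    intro m; rw [pvAInner_eq_any, pvScan_eq]
  simp only [hpred, List.nil_append, PySem.List.len_eq]
  refine Prod.ext ?_ rfl
  simp [List.length_pos_iff]
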